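-- pv_equiv track=rewrite | github.com/Lijunjie9502/Python-algorithm-notes | mytest.py | convert_list_to_str
-- ===== SOURCE A (Python) =====
-- def convert_list_to_str(number: list) -> str:
--     """
--     将列表转换为字符串
--     """
--     is_beginning0 = True
--     n_length = len(number)
--     res = ''
--     for i in range(n_length-1, -1, -1):  # 去掉列表尾部的 0
--         if is_beginning0 and number[i] != 0:
--             is_beginning0 = False
--
--         if not is_beginning0:
--             res += chr(number[i] + ord('0'))
--     if is_beginning0:
--         res = '0'
--     return res
-- ===== SOURCE B (Python) =====
-- def convert_list_to_str(number: list) -> str: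
--     """
--     将列表转换为字符串
--     """
--     res = ''
--     pending = 0  # run of zeros not yet known to be interior
--     for d in number:
--         if d == 0:
--             pending += 1
--         else:
--             res = chr(d + ord('0')) + '0' * pending + res
--             pending = 0
--     return res if res else '0'
-- ===== Notes on version B (the rewrite author's own statement) =====
-- stated objective: simpler
-- what changed: A scans backward with an is_beginning0 flag, appending each kept char; B scans FORWARD once, counting a pending run of zeros and prepending chr(d+48) plus the flushed '0'-run on each nonzero digit, so trailing zeros are simply never flushed.
import Mathlib
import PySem

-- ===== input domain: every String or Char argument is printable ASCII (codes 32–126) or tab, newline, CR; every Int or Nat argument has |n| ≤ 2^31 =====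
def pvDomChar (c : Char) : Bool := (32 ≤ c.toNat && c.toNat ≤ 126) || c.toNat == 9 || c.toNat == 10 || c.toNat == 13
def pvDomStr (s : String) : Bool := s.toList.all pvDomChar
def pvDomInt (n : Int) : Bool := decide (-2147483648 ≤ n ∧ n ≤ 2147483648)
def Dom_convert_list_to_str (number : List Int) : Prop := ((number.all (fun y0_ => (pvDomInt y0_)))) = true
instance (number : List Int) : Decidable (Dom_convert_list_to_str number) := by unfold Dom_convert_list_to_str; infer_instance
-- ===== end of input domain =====

-- B replaces A's backward flag-driven loop by a single FORWARD pass that prepends each nonzero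
-- digit (flushing a pending-zero counter), so trailing zeros are never emitted: a different
-- traversal order and state (simpler decomposition).


-- chr(d + ord('0')): exact on Pre_ (code point in range and not a lone surrogate)
def pvChr48 (d : Int) : Char := Char.ofNat (d + 48).toNat

-- ===== PORT A =====
-- A's loop body: update the is_beginning0 flag, then conditionally append chr(number[i]+ord('0'))
def pvStep (s : Bool × List Char) (d : Int) : Bool × List Char :=
  let b := if s.1 && !(d == 0) then false else s.1
  let res := if !b then s.2 ++ [pvChr48 d] else s.2
  (b, res)

def convert_list_to_str (number : List Int) : String :=
  let n_length : Int := number.length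
  let st := (PySem.List.pyRange (n_length - 1) (-1) (-1)).foldl
    (fun (s : Bool × List Char) i => pvStep s (PySem.List.pyGetD number i 0)) (true, [])
  if st.1 then "0" else String.ofList st.2

-- ===== PORT B =====
-- B's loop body: d == 0 just counts into pending; otherwise prepend chr(d+48) ++ '0'*pending
def pvStepB (s : List Char × Int) (d : Int) : List Char × Int :=
  if d == 0 then (s.1, s.2 + 1)
  else (pvChr48 d :: (List.replicate s.2.toNat '0' ++ s.1), 0)

def convert_list_to_str_alt (number : List Int) : String :=
  let st := number.foldl pvStepB ([], 0)
  if st.1 = [] then "0" else String.ofList st.1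

-- ===== PRECONDITION & SPEC =====
-- Pre_ excludes exactly the inputs where chr raises ValueError (code point out of range), and —
-- a representability narrowing — elements whose chr is a lone UTF-16 surrogate, which Python
-- returns inside a str but which is not a valid Lean Char (both Pythons return the same value there).
def Pre_convert_list_to_str (number : List Int) : Prop :=
  ∀ d ∈ number, -48 ≤ d ∧ d + 48 < 1114112 ∧ ¬(55296 ≤ d + 48 ∧ d + 48 < 57344)
instance (number : List Int) : Decidable (Pre_convert_list_to_str number) := by
  unfold Pre_convert_list_to_str; infer_instance
def pvWitness_convert_list_to_str : List Int := [1, 2, 0, 3, 0, 0]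
def Spec_convert_list_to_str (number : List Int) (out : String) : Prop := out = convert_list_to_str_alt number
instance (number : List Int) (out : String) : Decidable (Spec_convert_list_to_str number out) := by unfold Spec_convert_list_to_str; infer_instance

-- ===== CLAIM (what is proved, stated in full; the proofs are below) =====
def Claim_equal_convert_list_to_str : Prop := ∀ (number : List Int), Dom_convert_list_to_str number → Pre_convert_list_to_str number → Spec_convert_list_to_str number (convert_list_to_str number)

-- ===== LEMMAS AND PROOFS =====

lemma pvStep_false (l : List Int) : ∀ res : List Char,
    l.foldl pvStep (false, res) = (false, res ++ l.map pvChr48) := by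
  induction l with
  | nil => intro res; simp
  | cons d t ih =>
      intro res
      rw [List.foldl_cons, show pvStep (false, res) d = (false, res ++ [pvChr48 d]) from by
        simp [pvStep], ih]
      simp

lemma pvStep_true (l : List Int) :
    l.foldl pvStep (true, []) =
      (if (l.dropWhile (· == 0)).isEmpty then ((true : Bool), ([] : List Char))
       else (false, (l.dropWhile (· == 0)).map pvChr48)) := by
  induction l with
  | nil => simp
  | cons d t ih =>
      by_cases hd : d = 0
      · subst hd
        rw [List.foldl_cons, show pvStep (true, []) 0 = (true, []) from by simp [pvStep]]
        simpa using ih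
      · have hdw : (d :: t).dropWhile (· == 0) = d :: t := by
          simp [hd]
        rw [hdw, List.foldl_cons,
          show pvStep (true, []) d = (false, [pvChr48 d]) from by simp [pvStep, hd],
          pvStep_false]
        simp

lemma pvTakeWhile_map (l : List Int) :
    (l.takeWhile (· == 0)).map pvChr48
      = List.replicate (l.takeWhile (· == 0)).length '0' := by
  induction l with
  | nil => simp
  | cons d t ih =>
      by_cases hd : d = 0
      · subst hd
        simpa [List.replicate_succ,
          show pvChr48 0 = '0' from rfl] using ih
      · simp [hd]

lemma pvStepB_inv (l : List Int) :
    l.foldl pvStepB ([], 0) =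
      ((l.reverse.dropWhile (· == 0)).map pvChr48,
       ((l.reverse.takeWhile (· == 0)).length : Int)) := by
  induction l using List.reverseRecOn with
  | nil => simp
  | append_singleton t d ih =>
      rw [List.foldl_append, ih]
      by_cases hd : d = 0
      · subst hd
        simp [pvStepB]
      · have : t.reverse = t.reverse.takeWhile (· == 0) ++ t.reverse.dropWhile (· == 0) :=
          (List.takeWhile_append_dropWhile).symm
        simp only [List.reverse_append, List.reverse_cons, List.reverse_nil,
          List.nil_append, List.singleton_append, List.foldl_cons, List.foldl_nil,
          pvStepB, List.dropWhile_cons, List.takeWhile_cons,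
          show (d == 0) = false from by simp [hd]]
        simp only [if_false, Bool.false_eq_true, List.map_cons, List.length_nil,
          Int.toNat_natCast, Nat.cast_zero]
        have hmap : List.map pvChr48 t.reverse
            = List.replicate (t.reverse.takeWhile (· == 0)).length '0'
              ++ List.map pvChr48 (t.reverse.dropWhile (· == 0)) := by
          conv_lhs => rw [this]
          rw [List.map_append, pvTakeWhile_map]
        simp [hmap]

lemma pvA_eq (number : List Int) :
    convert_list_to_str number = convert_list_to_str_alt number := by
  simp only [convert_list_to_str, convert_list_to_str_alt]
  have h1 : PySem.List.pyRange ((number.length : Int) - 1) (-1) (-1)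
      = (PySem.List.pyRange 0 (number.length : Int) 1).reverse := by
    simpa using PySem.List.pyRange_neg_one_eq_reverse ((number.length : Int) - 1) (-1)
  have h2 : ((PySem.List.pyRange 0 (number.length : Int) 1).reverse).foldl
        (fun (s : Bool × List Char) i => pvStep s (PySem.List.pyGetD number i 0)) (true, [])
      = number.reverse.foldl pvStep (true, []) := by
    rw [← List.foldl_map (f := fun i => PySem.List.pyGetD number i 0) (g := pvStep),
      List.map_reverse, PySem.List.map_pyGetD_pyRange_zero']
  rw [h1, h2, pvStep_true, pvStepB_inv]
  by_cases h : (number.reverse.dropWhile (· == 0)) = [] <;> simp [h]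

-- ===== VERDICT (by name: the statement is the Claim_ definition above) =====
theorem convert_list_to_str_spec : Claim_equal_convert_list_to_str := by
  intro number _ _
  unfold Spec_convert_list_to_str
  exact pvA_eq number
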